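-- pv_equiv track=rewrite | github.com/BradleySmall/snailsort | snail.py | snail_sort
-- ===== SOURCE A (Python) =====
-- def snail_sort(matrix):
--     """Unwind a matrix clockwise into a string."""
--     new_list = []
--
--     while matrix:
--         new_list.extend(matrix.pop(0))
--         if not matrix:
--             continue
--
--         for i in range(len(matrix)):
--             new_list.append(matrix[i].pop())
--             if not matrix:
--                 break
--         if not matrix:
--             continue
--
--         new_list.extend(reversed(matrix.pop()))
--         if not matrix:
--             continue
--
--         for i in range(len(matrix) - 1, -1, -1):
--             new_list.append(matrix[i].pop(0))
--             if not matrix: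
--                 break
--     return new_list
-- ===== SOURCE B (Python) =====
-- def snail_sort(matrix):
--     """Unwind a matrix clockwise into a string."""
--     out = []
--     top, bottom = 0, len(matrix)
--     left, right = 0, (len(matrix[0]) if matrix else 0)
--     while top < bottom and left < right:
--         for j in range(left, right):
--             out.append(matrix[top][j])
--         top += 1
--         for i in range(top, bottom):
--             out.append(matrix[i][right - 1])
--         right -= 1
--         if top < bottom:
--             for j in range(right - 1, left - 1, -1):
--                 out.append(matrix[bottom - 1][j])
--             bottom -= 1
--         if left < right and top < bottom:
--             for i in range(bottom - 1, top - 1, -1):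
--                 out.append(matrix[i][left])
--             left += 1
--     return out
-- ===== Notes on version B (the rewrite author's own statement) =====
-- stated objective: alternative
-- what changed: Replaced A's destructive peeling (matrix.pop(0)/row.pop() rebuilding the matrix each ring) by a non-mutating index-based spiral with top/bottom/left/right boundary pointers that only reads matrix[i][j]; it trades A's C-level pops/extends for explicit index loops, so it is not measurably faster.
-- outside the precondition, e.g. on snail_sort([[1], [2, 3]]): A returns [1, 3, 2], B returns [1, 2]
import Mathlib
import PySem

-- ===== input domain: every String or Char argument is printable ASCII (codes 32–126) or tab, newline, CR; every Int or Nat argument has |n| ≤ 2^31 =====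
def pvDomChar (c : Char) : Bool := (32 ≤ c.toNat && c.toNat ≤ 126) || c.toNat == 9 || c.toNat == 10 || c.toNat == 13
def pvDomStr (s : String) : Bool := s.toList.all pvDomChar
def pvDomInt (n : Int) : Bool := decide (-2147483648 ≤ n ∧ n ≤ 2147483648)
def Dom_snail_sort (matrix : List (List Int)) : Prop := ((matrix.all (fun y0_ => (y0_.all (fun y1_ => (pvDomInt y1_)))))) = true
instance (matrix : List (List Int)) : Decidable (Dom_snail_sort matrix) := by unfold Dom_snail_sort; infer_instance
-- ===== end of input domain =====

-- B replaces A's destructive peeling (pop(0)/pop() per ring) by an index-based spiral with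
-- top/bottom/left/right boundary pointers that only reads matrix[i][j] in place; A also empties
-- `matrix` in place while B leaves it untouched — the equivalence claimed is about the RETURN value only.


-- ===== PORT A =====
-- `for i in range(len(matrix)): new_list.append(matrix[i].pop())` — each row loses its last
-- element (none = pop from an empty row = IndexError); the dead `if not matrix: break` can never
-- fire inside the for loops (rows are emptied, never removed, there) and is dropped.
def aRight : List (List Int) → Option (List Int × List (List Int))
  | [] => some ([], [])
  | row :: rs =>
    match row.getLast? with
    | none => none
    | some x =>
      match aRight rs with
      | none => none
      | some (vals, rs') => some (x :: vals, row.dropLast :: rs')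

-- `for i in range(len(matrix) - 1, -1, -1): new_list.append(matrix[i].pop(0))` — heads are
-- appended bottom row first, each row loses its head (none = IndexError on an empty row).
def aLeft : List (List Int) → Option (List Int × List (List Int))
  | [] => some ([], [])
  | row :: rs =>
    match aLeft rs with
    | none => none
    | some (vals, rs') =>
      match row with
      | [] => none
      | h :: t => some (vals ++ [h], t :: rs')

-- needed by aLoop's termination proof (cited in decreasing_by)
theorem aRight_length {rs : List (List Int)} {vals : List Int} {rs' : List (List Int)}
    (h : aRight rs = some (vals, rs')) : rs'.length = rs.length := by
  induction rs generalizing vals rs' with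
  | nil => simp [aRight] at h; simp [← h.2]
  | cons row rest ih =>
    simp only [aRight] at h
    cases hL : row.getLast? <;> rw [hL] at h
    · simp at h
    · cases hR : aRight rest <;> rw [hR] at h
      · simp at h
      · rename_i x p
        obtain ⟨v2, r2⟩ := p
        simp at h
        rw [← h.2]
        simp [ih hR]

theorem aLeft_length {rs : List (List Int)} {vals : List Int} {rs' : List (List Int)}
    (h : aLeft rs = some (vals, rs')) : rs'.length = rs.length := by
  induction rs generalizing vals rs' with
  | nil => simp [aLeft] at h; simp [← h.2]
  | cons row rest ih =>
    simp only [aLeft] at h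
    cases hR : aLeft rest <;> rw [hR] at h
    · simp at h
    · rename_i p
      obtain ⟨v2, r2⟩ := p
      cases row with
      | nil => simp at h
      | cons x t =>
        simp at h
        rw [← h.2]
        simp [ih hR]

-- the `while matrix:` loop; acc = new_list; each iteration peels the top row, the right column,
-- the reversed bottom row and the left column (bottom-up), exactly as A pops them.
def aLoop (m : List (List Int)) (acc : List Int) : Option (List Int) :=
  match m with
  | [] => some acc
  | r0 :: rest =>
    if rest = [] then some (acc ++ r0)
    else
      match hR : aRight rest with
      | none => none
      | some (vals, rest2) =>
        match rest2.getLast? with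
        | none => none
        | some lastRow =>
          if rest2.dropLast = [] then some (acc ++ r0 ++ vals ++ lastRow.reverse)
          else
            match hL : aLeft rest2.dropLast with
            | none => none
            | some (vals2, rest4) => aLoop rest4 (acc ++ r0 ++ vals ++ lastRow.reverse ++ vals2)
  termination_by m.length
  decreasing_by
    have h1 := aRight_length hR
    have h2 := aLeft_length hL
    simp only [List.length_dropLast] at h2
    simp only [List.length_cons]
    omega

def snail_sort (matrix : List (List Int)) : List Int := (aLoop matrix []).getD []

-- ===== PORT B =====
-- matrix[i][j] (indices always in range under Pre_; the defaults are never reached there)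
def giget (m : List (List Int)) (i j : Nat) : Int := (m.getD i []).getD j 0

-- the `while top < bottom and left < right:` loop of Source B, reading in place
def bLoop (m : List (List Int)) (top bottom left right : Nat) (out : List Int) : List Int :=
  if h : top < bottom ∧ left < right then
    let out1 := out ++ (List.range' left (right - left)).map (fun j => giget m top j)
    let top1 := top + 1
    let out2 := out1 ++ (List.range' top1 (bottom - top1)).map (fun i => giget m i (right - 1))
    let right1 := right - 1
    let out3 := if top1 < bottom then
        out2 ++ (List.range' left (right1 - left)).reverse.map (fun j => giget m (bottom - 1) j)
      else out2
    let bottom1 := if top1 < bottom then bottom - 1 else bottom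
    let out4 := if left < right1 ∧ top1 < bottom1 then
        out3 ++ (List.range' top1 (bottom1 - top1)).reverse.map (fun i => giget m i left)
      else out3
    let left1 := if left < right1 ∧ top1 < bottom1 then left + 1 else left
    bLoop m top1 bottom1 left1 right1 out4
  else out
  termination_by (bottom - top) + (right - left)
  decreasing_by split_ifs <;> omega

def snail_sort_alt (matrix : List (List Int)) : List Int :=
  bLoop matrix 0 matrix.length 0 (matrix.headD []).length []

-- ===== PRECONDITION & SPEC =====
-- Pre_ excludes non-rectangular matrices (A's pop-based peel reads a ragged matrix in an
-- accidental order or raises IndexError) and rectangular matrices with more than cols+1 rows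
-- (there A always raises IndexError popping from an already emptied row).
def Pre_snail_sort (matrix : List (List Int)) : Prop :=
  (∀ row ∈ matrix, row.length = (matrix.headD []).length) ∧
    matrix.length ≤ (matrix.headD []).length + 1

instance (matrix : List (List Int)) : Decidable (Pre_snail_sort matrix) := by
  unfold Pre_snail_sort; infer_instance

def pvWitness_snail_sort : List (List Int) := [[1, 2, 3], [4, 5, 6], [7, 8, 9]]

def Spec_snail_sort (matrix : List (List Int)) (out : List Int) : Prop := out = snail_sort_alt matrix
instance (matrix : List (List Int)) (out : List Int) : Decidable (Spec_snail_sort matrix out) := by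
  unfold Spec_snail_sort; infer_instance

-- ===== CLAIM (what is proved, stated in full; the proofs are below) =====
def Claim_equal_snail_sort : Prop := ∀ (matrix : List (List Int)), Dom_snail_sort matrix →
  Pre_snail_sort matrix → Spec_snail_sort matrix (snail_sort matrix)

-- ===== LEMMAS AND PROOFS =====
-- the row segment matrix[i][l:r] and the window rows t..b-1 × columns l..r-1, as index maps
def seg (m : List (List Int)) (i l r : Nat) : List Int :=
  (List.range' l (r - l)).map (fun j => giget m i j)

def sub (m : List (List Int)) (t b l r : Nat) : List (List Int) :=
  (List.range' t (b - t)).map (fun i => seg m i l r)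

theorem seg_concat {m : List (List Int)} {i l r : Nat} (h : l < r) :
    seg m i l r = seg m i l (r - 1) ++ [giget m i (r - 1)] := by
  unfold seg
  have h1 : r - l = (r - 1 - l) + 1 := by omega
  rw [h1, List.range'_concat]
  have h2 : l + 1 * (r - 1 - l) = r - 1 := by omega
  rw [h2]
  simp

theorem seg_cons {m : List (List Int)} {i l r : Nat} (h : l < r) :
    seg m i l r = giget m i l :: seg m i (l + 1) r := by
  unfold seg
  have h1 : r - l = (r - (l + 1)) + 1 := by omega
  rw [h1, List.range'_succ]
  simp

theorem aRight_sub {m : List (List Int)} {l r : Nat} (h : l < r) :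
    ∀ (n t : Nat), aRight ((List.range' t n).map (fun i => seg m i l r)) =
      some ((List.range' t n).map (fun i => giget m i (r - 1)),
            (List.range' t n).map (fun i => seg m i l (r - 1))) := by
  intro n
  induction n with
  | zero => intro t; simp [aRight]
  | succ k ih =>
    intro t
    simp only [List.range'_succ]
    simp only [List.map_cons]
    rw [seg_concat h]
    simp [aRight, ih (t + 1)]

theorem aLeft_sub {m : List (List Int)} {l r : Nat} (h : l < r) :
    ∀ (n t : Nat), aLeft ((List.range' t n).map (fun i => seg m i l r)) =
      some (((List.range' t n).reverse).map (fun i => giget m i l),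
            (List.range' t n).map (fun i => seg m i (l + 1) r)) := by
  intro n
  induction n with
  | zero => intro t; simp [aLeft]
  | succ k ih =>
    intro t
    simp only [List.range'_succ]
    simp only [List.map_cons]
    rw [seg_cons h]
    simp [aLeft, ih (t + 1)]

theorem aLoop_single (r0 : List Int) (acc : List Int) : aLoop [r0] acc = some (acc ++ r0) := by
  simp [aLoop]

theorem aLoop_step2 (r0 : List Int) (rest : List (List Int)) (acc vals lastRow : List Int)
    (rest2 : List (List Int)) (hne : rest ≠ []) (hR : aRight rest = some (vals, rest2))
    (hL : rest2.getLast? = some lastRow) (hd : rest2.dropLast = []) :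
    aLoop (r0 :: rest) acc = some (acc ++ r0 ++ vals ++ lastRow.reverse) := by
  rw [aLoop, if_neg hne]
  split
  · rename_i h; rw [hR] at h; cases h
  · rename_i v r2 h
    rw [hR] at h
    injection h with h
    injection h with h1 h2
    subst h1; subst h2
    rw [hL]
    simp [hd]

theorem aLoop_step4 (r0 : List Int) (rest : List (List Int)) (acc vals lastRow vals2 : List Int)
    (rest2 rest4 : List (List Int)) (hne : rest ≠ []) (hR : aRight rest = some (vals, rest2))
    (hL : rest2.getLast? = some lastRow) (hd : rest2.dropLast ≠ [])
    (haL : aLeft rest2.dropLast = some (vals2, rest4)) :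
    aLoop (r0 :: rest) acc = aLoop rest4 (acc ++ r0 ++ vals ++ lastRow.reverse ++ vals2) := by
  rw [aLoop, if_neg hne]
  split
  · rename_i h; rw [hR] at h; cases h
  · rename_i v r2 h
    rw [hR] at h
    injection h with h
    injection h with h1 h2
    subst h1; subst h2
    rw [hL]
    simp only [if_neg hd]
    split
    · rename_i h'; rw [haL] at h'; cases h'
    · rename_i v2 r4 h'
      rw [haL] at h'
      injection h' with h'
      injection h' with h3 h4
      subst h3; subst h4
      rfl

theorem loop_eq (m : List (List Int)) :
    ∀ (N t b l r : Nat) (out : List Int), b - t ≤ N → b - t ≤ (r - l) + 1 →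
      aLoop (sub m t b l r) out = some (bLoop m t b l r out) := by
  intro N
  induction N with
  | zero =>
    intro t b l r out hN _
    have hb : b ≤ t := by omega
    rw [bLoop]
    simp [sub, Nat.sub_eq_zero_of_le hb, aLoop, hb]
  | succ K ih =>
    intro t b l r out hN hshape
    by_cases htb : t < b
    · by_cases hlr : l < r
      · -- main case: one ring
        have hsub : sub m t b l r = seg m t l r :: sub m (t + 1) b l r := by
          unfold sub
          have hx : b - t = (b - (t + 1)) + 1 := by omega
          rw [hx, List.range'_succ]; simp
        rw [hsub]
        by_cases h1 : t + 1 < b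
        · -- at least two rows in the window
          have hrest : sub m (t + 1) b l r ≠ [] := by
            unfold sub
            have : b - (t + 1) ≠ 0 := by omega
            simp [List.range'_eq_nil_iff, this]
          have haR : aRight (sub m (t + 1) b l r) =
              some ((List.range' (t+1) (b-(t+1))).map (fun i => giget m i (r - 1)),
                    (List.range' (t+1) (b-(t+1))).map (fun i => seg m i l (r - 1))) :=
            aRight_sub hlr (b - (t+1)) (t+1)
          have hbt : b - (t + 1) = (b - 1 - (t + 1)) + 1 := by omega
          have hsplit : (List.range' (t+1) (b-(t+1))).map (fun i => seg m i l (r - 1)) =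
              (List.range' (t+1) (b-1-(t+1))).map (fun i => seg m i l (r - 1)) ++
                [seg m (b-1) l (r - 1)] := by
            rw [hbt, List.range'_concat]
            have h5 : t + 1 + 1 * (b - 1 - (t + 1)) = b - 1 := by omega
            rw [h5]
            simp
          have hLast : ((List.range' (t+1) (b-(t+1))).map (fun i => seg m i l (r - 1))).getLast? =
              some (seg m (b-1) l (r - 1)) := by
            rw [hsplit]; exact List.getLast?_concat
          have hdrop : ((List.range' (t+1) (b-(t+1))).map (fun i => seg m i l (r - 1))).dropLast =
              (List.range' (t+1) (b-1-(t+1))).map (fun i => seg m i l (r - 1)) := by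
            rw [hsplit]; exact List.dropLast_concat
          by_cases h2 : t + 1 < b - 1
          · -- the fourth side exists
            have hlr1 : l < r - 1 := by omega
            have hd : ((List.range' (t+1) (b-(t+1))).map (fun i => seg m i l (r - 1))).dropLast ≠ [] := by
              rw [hdrop]
              have : b - 1 - (t + 1) ≠ 0 := by omega
              simp [List.range'_eq_nil_iff, this]
            have haL : aLeft ((List.range' (t+1) (b-(t+1))).map (fun i => seg m i l (r - 1))).dropLast =
                some (((List.range' (t+1) (b-1-(t+1))).reverse).map (fun i => giget m i l),
                      (List.range' (t+1) (b-1-(t+1))).map (fun i => seg m i (l + 1) (r - 1))) := by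
              rw [hdrop]; exact aLeft_sub hlr1 (b-1-(t+1)) (t+1)
            rw [aLoop_step4 _ _ _ _ _ _ _ _ hrest haR hLast hd haL]
            have hrec := ih (t + 1) (b - 1) (l + 1) (r - 1)
              (out ++ seg m t l r ++ (List.range' (t+1) (b-(t+1))).map (fun i => giget m i (r - 1)) ++
                (seg m (b-1) l (r - 1)).reverse ++
                ((List.range' (t+1) (b-1-(t+1))).reverse).map (fun i => giget m i l))
              (by omega) (by omega)
            have hsub2 : sub m (t+1) (b-1) (l+1) (r-1) =
                (List.range' (t+1) (b-1-(t+1))).map (fun i => seg m i (l + 1) (r - 1)) := rfl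
            rw [hsub2] at hrec
            rw [hrec]
            -- align with one unfolding of bLoop
            conv_rhs => rw [bLoop]
            rw [dif_pos (And.intro htb hlr)]
            simp only [if_pos h1, if_pos (And.intro hlr1 h2)]
            congr 1
            unfold seg
            simp [List.map_reverse, List.append_assoc]
          · -- exactly two rows: the reversed bottom row ends the walk
            have hone : b - 1 - (t + 1) = 0 := by omega
            have hd0 : ((List.range' (t+1) (b-(t+1))).map (fun i => seg m i l (r - 1))).dropLast = [] := by
              rw [hdrop, hone]
              simp
            rw [aLoop_step2 _ _ _ _ _ _ hrest haR hLast hd0]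
            rw [bLoop]
            rw [dif_pos (And.intro htb hlr)]
            have h4 : ¬ (l < r - 1 ∧ t + 1 < b - 1) := by omega
            simp only [if_pos h1, if_neg h4]
            rw [bLoop]
            have hguard : ¬ (t + 1 < b - 1 ∧ l < r - 1) := by omega
            rw [dif_neg hguard]
            congr 1
            have hbt1 : b - (t + 1) = 1 := by omega
            rw [hbt1]
            have hb1 : t + 1 + 0 = b - 1 := by omega
            unfold seg
            simp [List.range'_succ, hb1, List.map_reverse, List.append_assoc]
        · -- a single row in the window
          have hone : b - (t + 1) = 0 := by omega
          have hrest : sub m (t + 1) b l r = [] := by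
            unfold sub; rw [hone]; simp
          rw [hrest, aLoop_single]
          rw [bLoop]
          rw [dif_pos (And.intro htb hlr)]
          have h3 : ¬ (l < r - 1 ∧ t + 1 < b) := by omega
          simp only [if_neg h1, if_neg h3]
          rw [bLoop]
          have hguard : ¬ (t + 1 < b ∧ l < r - 1) := by omega
          rw [dif_neg hguard]
          rw [hone]
          simp [seg]
      · -- empty rows: the shape bound forces a single empty row
        have hr : r - l = 0 := by omega
        have hone : b = t + 1 := by omega
        have hsub : sub m t b l r = [[]] := by
          unfold sub seg; simp [hone, hr, List.range'_succ]
        rw [hsub, bLoop]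
        simp [aLoop, hlr, htb]
    · -- empty window
      rw [bLoop]
      have : b - t = 0 := by omega
      simp [sub, this, aLoop, htb]

theorem pvRow_eq (row : List Int) (i : Nat) (m : List (List Int)) (hm : m.getD i [] = row) :
    seg m i 0 row.length = row := by
  unfold seg giget
  rw [hm]
  apply List.ext_getElem
  · simp
  · intro k h1 h2
    simp [List.getD_eq_getElem?_getD, List.getElem?_eq_getElem h2]

theorem pvSub_self {m : List (List Int)} {c : Nat} (h : ∀ row ∈ m, row.length = c) :
    sub m 0 m.length 0 c = m := by
  apply List.ext_getElem
  · simp [sub]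
  · intro i h1 h2
    unfold sub
    simp only [Nat.sub_zero] at h1 ⊢
    rw [List.getElem_map, List.getElem_range']
    simp only [Nat.zero_add, Nat.one_mul]
    have hm : m.getD i [] = m[i] := List.getD_eq_getElem m [] h2
    have hc : m[i].length = c := h m[i] (List.getElem_mem h2)
    rw [← hc, pvRow_eq m[i] i m hm]

-- ===== VERDICT (by name: the statement is the Claim_ definition above) =====
theorem snail_sort_spec : Claim_equal_snail_sort := by
  intro m _ hPre
  obtain ⟨hrect, hshape⟩ := hPre
  show snail_sort m = snail_sort_alt m
  unfold snail_sort snail_sort_alt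
  have hm := pvSub_self (c := (m.headD []).length) hrect
  have h := loop_eq m m.length 0 m.length 0 (m.headD []).length [] (by omega) (by omega)
  rw [hm] at h
  rw [h]
  rfl
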